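-- pv_equiv track=rewrite | github.com/nnmnn1022/Algorithm | 이진_변환_반복하기.py | solution
-- ===== SOURCE A (Python) =====
-- def func(st):
--         a = st.count("0")
--         b = bin(st.count("1"))[2:]
--
--         return a, b
--
-- def solution(x):
--     s = x
--     i = 0
--     sum = 0
--     while(s != "1"):
--         i += 1
--         t, s = func(s)
--         sum += t
--
--     return [i, sum]
-- ===== SOURCE B (Python) =====
-- def solution(x):
--     # Two staged passes instead of one accumulator loop: first materialise the
--     # whole chain of ones-counts down to 1, then derive both answers from the
--     # chain's length and a zip-sum over consecutive elements.
--     if x == "1":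
--         return [0, 0]
--     chain = [x.count("1")]
--     while chain[-1] != 1:
--         chain.append(chain[-1].bit_count())
--     total = x.count("0") + sum(c.bit_length() - p for c, p in zip(chain, chain[1:]))
--     return [len(chain), total]
-- ===== Notes on version B (the rewrite author's own statement) =====
-- stated objective: alternative
-- what changed: B splits A's single accumulator while-loop into two staged passes: it first materialises the whole chain of ones-counts as a list via bit_count, then computes the step count as the chain's length and the zero total as one zip-sum of bit_length minus popcount over consecutive chain elements, touching the input string only once.
import Mathlib
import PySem

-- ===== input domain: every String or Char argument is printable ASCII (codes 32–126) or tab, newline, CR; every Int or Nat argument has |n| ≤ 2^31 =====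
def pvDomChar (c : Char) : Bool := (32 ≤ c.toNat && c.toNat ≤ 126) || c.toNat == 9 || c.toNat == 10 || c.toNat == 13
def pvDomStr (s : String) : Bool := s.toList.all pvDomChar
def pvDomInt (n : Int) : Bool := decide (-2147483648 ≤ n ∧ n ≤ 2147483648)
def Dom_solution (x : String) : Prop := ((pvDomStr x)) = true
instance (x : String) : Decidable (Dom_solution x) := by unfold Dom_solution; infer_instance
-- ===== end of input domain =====

-- B replaces A's single accumulator while-loop by two staged passes: it first
-- materialises the whole chain of ones-counts as a list, then reads off the
-- step count as the chain's length and the zero total as one zip-sum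
-- (objective: alternative). Both Python programs diverge when the input
-- contains no '1'; Pre_ excludes exactly those inputs.

-- ===== PORT A =====
-- func(st): a = st.count("0"); b = bin(st.count("1"))[2:]  (bin(k) = toBinChars0b, [2:] = slice from 2)
def funcA (st : List Char) : Int × List Char :=
  ((PySem.Chars.count st ['0'] : Int),
   PySem.List.slice (PySem.Int.toBinChars0b (PySem.Chars.count st ['1'] : Int)) (some 2) none)

-- the while loop; fuel only makes it total (Python diverges when the string has no '1',
-- excluded by Pre_); inside Pre_ the fuel below is proved sufficient.
def loopA : Nat → List Char → Int → Int → List Int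
  | 0, _, i, sum => [i, sum]
  | fuel+1, s, i, sum =>
    if s = ['1'] then [i, sum]
    else
      let ts := funcA s
      loopA fuel ts.2 (i + 1) (sum + ts.1)

def solution (x : String) : List Int :=
  loopA (x.toList.length + 2) x.toList 0 0

-- ===== PORT B =====
-- stage 1 of Source B: the chain of ones-counts down to 1, built as a list; fuel
-- only makes it total (Python diverges when the count is 0, excluded by Pre_;
-- the count strictly decreases, so the fuel passed below is sufficient).
def chainB : Nat → Nat → List Nat
  | 0, c => [c]
  | fuel+1, c => if c = 1 then [c] else c :: chainB fuel (PySem.Int.bitCount (c : Int))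

def solution_alt (x : String) : List Int :=
  if x = "1" then [0, 0]
  else
    let ch := chainB (PySem.Chars.count x.toList ['1'] + 1) (PySem.Chars.count x.toList ['1'])
    -- stage 2: total = x.count("0") + sum(c.bit_length() - p for c, p in zip(chain, chain[1:]))
    let total : Int := (PySem.Chars.count x.toList ['0'] : Int)
      + ((ch.zip ch.tail).map (fun cp => (PySem.Int.bitLength (cp.1 : Int) : Int) - (cp.2 : Int))).sum
    [(ch.length : Int), total]

-- ===== PRECONDITION & SPEC =====
-- Pre_ excludes exactly the inputs with no '1' character: on them Python A's while loop
-- never reaches its exit condition, so A never returns (it loops forever).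
def Pre_solution (x : String) : Prop := '1' ∈ x.toList
instance (x : String) : Decidable (Pre_solution x) := by unfold Pre_solution; infer_instance
def pvWitness_solution : String := "10110"

def Spec_solution (x : String) (out : List Int) : Prop := out = solution_alt x
instance (x : String) (out : List Int) : Decidable (Spec_solution x out) := by unfold Spec_solution; infer_instance

-- ===== CLAIM (what is proved, stated in full; the proofs are below) =====
def Claim_equal_solution : Prop := ∀ (x : String), Dom_solution x → Pre_solution x → Spec_solution x (solution x)

-- ===== LEMMAS AND PROOFS =====

-- single-character substring count is character count
lemma chars_count_go_singleton (c : Char) (l : List Char) :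
    ∀ fuel acc, l.length ≤ fuel → PySem.Chars.count.go [c] fuel l acc = acc + l.count c := by
  induction l with
  | nil => intro fuel acc _; cases fuel <;> simp [PySem.Chars.count.go]
  | cons h t ih =>
    intro fuel acc hf
    cases fuel with
    | zero => simp at hf
    | succ f =>
      have hf' : t.length ≤ f := by simp at hf; omega
      by_cases hc : c = h
      · subst hc
        have hp : ([c].isPrefixOf (c :: t)) = true := by simp [List.isPrefixOf]
        simp only [PySem.Chars.count.go, hp, if_true, List.length_cons, List.length_nil,
          List.drop_succ_cons, List.drop_zero]
        rw [ih f (acc + 1) hf']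
        simp
        omega
      · have hp : ([c].isPrefixOf (h :: t)) = false := by
          simp [List.isPrefixOf]; exact fun a => absurd a hc
        simp only [PySem.Chars.count.go, hp, if_false, Bool.false_eq_true]
        rw [ih f acc hf']
        simp [Ne.symm hc]

lemma chars_count_singleton (c : Char) (l : List Char) :
    PySem.Chars.count l [c] = l.count c := by
  simp [PySem.Chars.count]
  simpa using chars_count_go_singleton c l l.length 0 le_rfl

-- bin(k)[2:] for k : Nat is the plain binary-digit list
lemma slice_toBinChars0b (k : Nat) :
    PySem.List.slice (PySem.Int.toBinChars0b (k : Int)) (some 2) none = Nat.toDigits 2 k := by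
  have h0b : PySem.Int.toBinChars0b (k : Int) = '0' :: 'b' :: Nat.toDigits 2 k := by
    simp [PySem.Int.toBinChars0b]
  rw [h0b, PySem.List.slice_from _ (by norm_num : (0:Int) ≤ 2)]
  rfl

-- the binary digit string of c counts: ones = bitCount, zeros = bitLength - bitCount
lemma count_one_toDigits (c : Nat) :
    ((Nat.toDigits 2 c).count '1' : Int) = (PySem.Int.bitCount (c : Int) : Int) := by
  induction c using Nat.strong_induction_on with
  | _ c ih =>
    rcases Nat.eq_zero_or_pos c with hc | hc
    · subst hc; decide
    rcases Nat.lt_or_ge c 2 with h2 | h2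
    · interval_cases c; decide
    · rw [Nat.toDigits_of_base_le (by norm_num) h2, PySem.Int.bitCount_natCast hc]
      push_cast [List.count_append]
      rw [ih (c / 2) (Nat.div_lt_self hc (by norm_num))]
      rcases Nat.mod_two_eq_zero_or_one c with hm | hm <;>
        simp [hm, Nat.digitChar] <;> omega

lemma count_zero_toDigits (c : Nat) (hc : 0 < c) :
    ((Nat.toDigits 2 c).count '0' : Int)
      = (PySem.Int.bitLength (c : Int) : Int) - (PySem.Int.bitCount (c : Int) : Int) := by
  induction c using Nat.strong_induction_on with
  | _ c ih =>
    rcases Nat.lt_or_ge c 2 with h2 | h2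
    · interval_cases c; decide
    · rw [Nat.toDigits_of_base_le (by norm_num) h2,
          PySem.Int.bitCount_natCast (by omega), PySem.Int.bitLength_natCast (by omega)]
      push_cast [List.count_append]
      rw [ih (c / 2) (Nat.div_lt_self (by omega) (by norm_num)) (by omega)]
      rcases Nat.mod_two_eq_zero_or_one c with hm | hm <;>
        simp [hm, Nat.digitChar] <;> omega

lemma toDigits_eq_one_iff (c : Nat) (hc : 0 < c) :
    Nat.toDigits 2 c = ['1'] ↔ c = 1 := by
  constructor
  · intro h
    rcases Nat.lt_or_ge c 2 with h2 | h2
    · omega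
    · exfalso
      rw [Nat.toDigits_of_base_le (by norm_num) h2] at h
      have hl : (Nat.toDigits 2 (c / 2)).length + 1 = 1 := by
        simpa using congrArg List.length h
      have := @Nat.length_toDigits_pos 2 (c / 2)
      omega
  · rintro rfl; decide

-- one step of A's loop on a canonical binary string, expressed through B's quantities
lemma funcA_toDigits (c : Nat) (hc : 0 < c) :
    funcA (Nat.toDigits 2 c)
      = ((PySem.Int.bitLength (c : Int) : Int) - (PySem.Int.bitCount (c : Int) : Int),
         Nat.toDigits 2 (PySem.Int.bitCount (c : Int))) := by
  unfold funcA
  rw [chars_count_singleton, chars_count_singleton]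
  rw [count_zero_toDigits c hc]
  have h1 : ((Nat.toDigits 2 c).count '1' : Int) = (PySem.Int.bitCount (c : Int) : Int) :=
    count_one_toDigits c
  have h1' : (Nat.toDigits 2 c).count '1' = PySem.Int.bitCount (c : Int) := by exact_mod_cast h1
  rw [h1', slice_toBinChars0b]

lemma bitCount_lt (c : Nat) (h2 : 2 ≤ c) : PySem.Int.bitCount (c : Int) < c := by
  induction c using Nat.strong_induction_on with
  | _ c ih =>
    rcases Nat.lt_or_ge c 4 with h4 | h4
    · interval_cases c <;> decide
    · rw [PySem.Int.bitCount_natCast (by omega)]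
      have := ih (c / 2) (Nat.div_lt_self (by omega) (by norm_num)) (by omega)
      omega

lemma bitCount_pos (c : Nat) (hc : 0 < c) : 0 < PySem.Int.bitCount (c : Int) := by
  induction c using Nat.strong_induction_on with
  | _ c ih =>
    rcases Nat.lt_or_ge c 2 with h2 | h2
    · interval_cases c; decide
    · rw [PySem.Int.bitCount_natCast (by omega)]
      have := ih (c / 2) (Nat.div_lt_self (by omega) (by norm_num)) (by omega)
      omega

-- the chain always starts with its argument
lemma chainB_head (fuel c : Nat) : ∃ t, chainB fuel c = c :: t := by
  cases fuel with
  | zero => exact ⟨[], rfl⟩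
  | succ f =>
    by_cases h : c = 1
    · exact ⟨[], by simp [chainB, h]⟩
    · exact ⟨chainB f (PySem.Int.bitCount (c : Int)), by simp [chainB, h]⟩

-- A's loop, run from the canonical binary string of c, returns exactly what B
-- reads off the chain starting at c (with any sufficient fuel on both sides)
lemma loop_eq (c : Nat) (hc : 0 < c) :
    ∀ fA fB (i sum : Int), c ≤ fA → c ≤ fB →
      loopA fA (Nat.toDigits 2 c) i sum
        = [i + ((chainB fB c).length : Int) - 1,
           sum + (((chainB fB c).zip (chainB fB c).tail).map
             (fun cp => (PySem.Int.bitLength (cp.1 : Int) : Int) - (cp.2 : Int))).sum] := by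
  induction c using Nat.strong_induction_on with
  | _ c ih =>
    intro fA fB i sum hfA hfB
    obtain ⟨fA', rfl⟩ : ∃ k, fA = k + 1 := ⟨fA - 1, by omega⟩
    obtain ⟨fB', rfl⟩ : ∃ k, fB = k + 1 := ⟨fB - 1, by omega⟩
    by_cases h1 : c = 1
    · subst h1
      have h11 : Nat.toDigits 2 1 = ['1'] := by decide
      simp [loopA, chainB, h11]
    · have h2 : 2 ≤ c := by omega
      have hS : Nat.toDigits 2 c ≠ ['1'] := by
        intro h; exact h1 ((toDigits_eq_one_iff c hc).mp h)
      have hcB : chainB (fB' + 1) c = c :: chainB fB' (PySem.Int.bitCount (c : Int)) := by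
        simp [chainB, h1]
      obtain ⟨t, ht⟩ := chainB_head fB' (PySem.Int.bitCount (c : Int))
      simp only [loopA, if_neg hS, hcB]
      rw [funcA_toDigits c hc]
      rw [ih (PySem.Int.bitCount (c : Int)) (bitCount_lt c h2) (bitCount_pos c hc)
        fA' fB' (i + 1) _ (by have := bitCount_lt c h2; omega) (by have := bitCount_lt c h2; omega)]
      rw [ht]
      simp only [List.length_cons, List.tail_cons, List.zip_cons_cons, List.map_cons,
        List.sum_cons, List.cons.injEq, and_true]
      constructor <;> (push_cast; ring)

lemma loopA_step (f : Nat) (s : List Char) (i sum : Int) (h : s ≠ ['1']) :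
    loopA (f + 1) s i sum = loopA f (funcA s).2 (i + 1) (sum + (funcA s).1) := by
  simp [loopA, h]

-- ===== VERDICT (by name: the statement is the Claim_ definition above) =====
theorem solution_spec : Claim_equal_solution := by
  intro x _ hpre
  unfold Spec_solution solution solution_alt
  by_cases hx : x = "1"
  · subst hx
    decide
  · rw [if_neg hx]
    have hones : 0 < PySem.Chars.count x.toList ['1'] := by
      rw [chars_count_singleton]
      exact List.count_pos_iff.mpr hpre
    have hlen : PySem.Chars.count x.toList ['1'] ≤ x.toList.length := by
      rw [chars_count_singleton]
      exact List.count_le_length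
    have hS : x.toList ≠ ['1'] := fun h => hx (String.toList_inj.mp h)
    show loopA (x.toList.length + 1 + 1) x.toList 0 0 = _
    rw [loopA_step _ _ _ _ hS]
    rw [show funcA x.toList
        = ((PySem.Chars.count x.toList ['0'] : Int),
           Nat.toDigits 2 (PySem.Chars.count x.toList ['1'])) from by
      unfold funcA; rw [slice_toBinChars0b]]
    rw [loop_eq (PySem.Chars.count x.toList ['1']) hones (x.toList.length + 1)
      (PySem.Chars.count x.toList ['1'] + 1) _ _ (by omega) (by omega)]
    simp only [List.cons.injEq, and_true]
    constructor <;> (push_cast; ring)
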